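-- pv_equiv track=rewrite | github.com/jyajoo/Problem-Solving | Programmers/Implementation/120808.py | solution
-- ===== SOURCE A (Python) =====
-- def solution(numer1, denom1, numer2, denom2):
--     answer = []
--
--     # 최소 공배수
--     denom = max(denom1, denom2)
--     while True:
--         if denom % denom1 == 0 and denom % denom2 == 0:
--             break
--         denom += 1
--
--     numer1 *= denom // denom1
--     numer2 *= denom // denom2
--     numer = numer1 + numer2
--
--     # 최대 공약수
--     num = max(numer, denom)
--     while True:
--         if numer % num == 0 and denom % num == 0:
--             break
--         num -= 1
--         if num == 1:
--             break
--
--     return [numer // num, denom // num]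
-- ===== SOURCE B (Python) =====
-- def solution(numer1, denom1, numer2, denom2):
--     # Cross-multiply instead of searching for the LCM, then reduce once
--     # with a Euclidean gcd loop; normalise the sign so the denominator is positive.
--     numer = numer1 * denom2 + numer2 * denom1
--     denom = denom1 * denom2
--     if denom < 0:
--         numer, denom = -numer, -denom
--     a, b = abs(numer), abs(denom)
--     while b:
--         a, b = b, a % b
--     return [numer // a, denom // a]
-- ===== Notes on version B (the rewrite author's own statement) =====
-- stated objective: faster
-- what changed: Replaces A's two linear searches (counting up from max(denom1,denom2) to find the LCM, counting down from max(numer,denom) to find the GCD) with closed-form cross multiplication plus a single Euclidean gcd loop and a sign normalisation.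
-- outside the precondition, e.g. on solution(1, -2, 1, -2): A returns [1, -1], B returns [-1, 1]
import Mathlib
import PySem

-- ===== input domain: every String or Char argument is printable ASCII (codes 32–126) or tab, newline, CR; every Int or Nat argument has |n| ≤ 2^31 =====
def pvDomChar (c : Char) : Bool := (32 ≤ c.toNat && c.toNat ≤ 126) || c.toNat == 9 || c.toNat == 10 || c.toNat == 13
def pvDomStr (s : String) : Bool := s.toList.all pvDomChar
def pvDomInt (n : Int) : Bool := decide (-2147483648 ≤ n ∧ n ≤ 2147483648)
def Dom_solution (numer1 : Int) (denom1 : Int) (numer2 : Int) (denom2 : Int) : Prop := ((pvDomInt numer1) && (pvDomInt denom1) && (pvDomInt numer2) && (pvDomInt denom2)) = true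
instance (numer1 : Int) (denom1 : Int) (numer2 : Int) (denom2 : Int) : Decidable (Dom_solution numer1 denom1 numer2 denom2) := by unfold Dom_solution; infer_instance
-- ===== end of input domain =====

-- B replaces A's two linear searches (count up from max(denom1,denom2) to the LCM,
-- count down from max(numer,denom) to the GCD) with cross multiplication, a sign
-- normalisation and a single Euclidean gcd loop (objective: faster).


-- ===== PORT A =====
-- A's first `while True` searches upward for the least common multiple; ported with
-- explicit fuel (A diverges on some inputs outside Pre_; inside Pre_ the fuel suffices).
def lcmLoopA (denom1 denom2 : Int) : Nat → Int → Int
  | 0, denom => denom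
  | fuel + 1, denom =>
    if PySem.Int.mod denom denom1 = 0 ∧ PySem.Int.mod denom denom2 = 0 then denom
    else lcmLoopA denom1 denom2 fuel (denom + 1)

-- A's second `while True` searches downward for the greatest common divisor
-- (breaking at 1 before testing it); ported with fuel likewise.
def gcdLoopA (numer denom : Int) : Nat → Int → Int
  | 0, num => num
  | fuel + 1, num =>
    if PySem.Int.mod numer num = 0 ∧ PySem.Int.mod denom num = 0 then num
    else if num - 1 = 1 then num - 1
    else gcdLoopA numer denom fuel (num - 1)

def solution (numer1 : Int) (denom1 : Int) (numer2 : Int) (denom2 : Int) : List Int :=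
  let denom := lcmLoopA denom1 denom2 (denom1.natAbs * denom2.natAbs + 1) (max denom1 denom2)
  let numer1' := numer1 * PySem.Int.floordiv denom denom1
  let numer2' := numer2 * PySem.Int.floordiv denom denom2
  let numer := numer1' + numer2'
  let num := gcdLoopA numer denom ((max numer denom).toNat + 1) (max numer denom)
  [PySem.Int.floordiv numer num, PySem.Int.floordiv denom num]

-- ===== PORT B =====
-- B's `while b: a, b = b, a % b` Euclidean loop on the absolute values
def gcdE (a b : Nat) : Nat :=
  if h : b = 0 then a else gcdE b (a % b)
termination_by b
decreasing_by exact Nat.mod_lt _ (Nat.pos_of_ne_zero h)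

def solution_alt (numer1 : Int) (denom1 : Int) (numer2 : Int) (denom2 : Int) : List Int :=
  let numer0 := numer1 * denom2 + numer2 * denom1
  let denom0 := denom1 * denom2
  let p := if denom0 < 0 then (-numer0, -denom0) else (numer0, denom0)
  let g : Int := (gcdE p.1.natAbs p.2.natAbs : Nat)
  [PySem.Int.floordiv p.1 g, PySem.Int.floordiv p.2 g]

-- ===== PRECONDITION & SPEC =====
-- Pre_ excludes zero denominators (A raises ZeroDivisionError) and the pairs with
-- max(denom1,denom2) ≤ 0 (both denominators negative), on which A raises, loops
-- forever, or returns an accidental non-canonical fraction with a negative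
-- denominator (e.g. solution(1,-2,1,-2) = [1,-1]).
def Pre_solution (numer1 : Int) (denom1 : Int) (numer2 : Int) (denom2 : Int) : Prop :=
  denom1 ≠ 0 ∧ denom2 ≠ 0 ∧ (1 ≤ denom1 ∨ 1 ≤ denom2)
instance (numer1 : Int) (denom1 : Int) (numer2 : Int) (denom2 : Int) : Decidable (Pre_solution numer1 denom1 numer2 denom2) := by unfold Pre_solution; infer_instance

def pvWitness_solution : Int × Int × Int × Int := (1, 2, 3, 4)

def Spec_solution (numer1 : Int) (denom1 : Int) (numer2 : Int) (denom2 : Int) (out : List Int) : Prop := out = solution_alt numer1 denom1 numer2 denom2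
instance (numer1 : Int) (denom1 : Int) (numer2 : Int) (denom2 : Int) (out : List Int) : Decidable (Spec_solution numer1 denom1 numer2 denom2 out) := by unfold Spec_solution; infer_instance

-- ===== CLAIM (what is proved, stated in full; the proofs are below) =====
def Claim_equal_solution : Prop := ∀ (numer1 : Int) (denom1 : Int) (numer2 : Int) (denom2 : Int), Dom_solution numer1 denom1 numer2 denom2 → Pre_solution numer1 denom1 numer2 denom2 → Spec_solution numer1 denom1 numer2 denom2 (solution numer1 denom1 numer2 denom2)

-- ===== LEMMAS AND PROOFS =====

theorem gcdE_eq_gcd (a b : Nat) : gcdE a b = Nat.gcd a b := by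
  induction b using Nat.strong_induction_on generalizing a with
  | _ b ih =>
    rw [gcdE]
    by_cases h : b = 0
    · simp [h]
    · rw [dif_neg h, ih _ (Nat.mod_lt _ (Nat.pos_of_ne_zero h)), Nat.gcd_comm b,
        ← Nat.gcd_rec, Nat.gcd_comm]
theorem lcmLoopA_eq (d1 d2 L : Int) (hL1 : d1 ∣ L) (hL2 : d2 ∣ L)
    (hmin : ∀ m : Int, 0 < m → m < L → ¬(d1 ∣ m ∧ d2 ∣ m)) :
    ∀ (fuel : Nat) (start : Int), 0 < start → start ≤ L → (L - start).toNat < fuel →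
      lcmLoopA d1 d2 fuel start = L := by
  intro fuel
  induction fuel with
  | zero => intro start _ _ h; omega
  | succ n ih =>
    intro start hpos hle hfuel
    rw [lcmLoopA]
    by_cases hc : PySem.Int.mod start d1 = 0 ∧ PySem.Int.mod start d2 = 0
    · rw [if_pos hc]
      rcases hc with ⟨h1, h2⟩
      rw [PySem.Int.mod_eq_zero_iff_dvd] at h1 h2
      rcases lt_or_eq_of_le hle with hlt | he
      · exact absurd ⟨h1, h2⟩ (hmin start hpos hlt)
      · exact he
    · rw [if_neg hc]
      have hne : start ≠ L := by
        rintro rfl; exact hc ⟨(PySem.Int.mod_eq_zero_iff_dvd _ _).mpr hL1,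
          (PySem.Int.mod_eq_zero_iff_dvd _ _).mpr hL2⟩
      exact ih (start + 1) (by omega) (by omega) (by omega)
theorem gcdLoopA_eq (numer denom : Int) (hden : denom ≠ 0) :
    ∀ (fuel : Nat) (num : Int), (Int.gcd numer denom : Int) ≤ num →
      (num - (Int.gcd numer denom : Int)).toNat < fuel →
      gcdLoopA numer denom fuel num = (Int.gcd numer denom : Int) := by
  have hg : 0 < (Int.gcd numer denom : Int) := by
    exact_mod_cast Int.gcd_pos_iff.mpr (Or.inr hden)
  intro fuel
  induction fuel with
  | zero => intro num _ h; omega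
  | succ n ih =>
    intro num hge hfuel
    rw [gcdLoopA]
    by_cases hc : PySem.Int.mod numer num = 0 ∧ PySem.Int.mod denom num = 0
    · rw [if_pos hc]
      rcases hc with ⟨h1, h2⟩
      rw [PySem.Int.mod_eq_zero_iff_dvd] at h1 h2
      have hdg := Int.dvd_coe_gcd h1 h2
      have := Int.le_of_dvd hg hdg
      omega
    · rw [if_neg hc]
      have hne : num ≠ (Int.gcd numer denom : Int) := by
        rintro rfl
        exact hc ⟨(PySem.Int.mod_eq_zero_iff_dvd _ _).mpr (Int.gcd_dvd_left numer denom),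
          (PySem.Int.mod_eq_zero_iff_dvd _ _).mpr (Int.gcd_dvd_right numer denom)⟩
      by_cases h1 : num - 1 = 1
      · rw [if_pos h1]; omega
      · rw [if_neg h1]
        exact ih (num - 1) (by omega) (by omega)
theorem reduced_unique (a d b e : Int) (hd : 0 < d) (he : 0 < e) (h : a * e = b * d) :
    a / (Int.gcd a d : Int) = b / (Int.gcd b e : Int) ∧
    d / (Int.gcd a d : Int) = e / (Int.gcd b e : Int) := by
  have hg1n : 0 < Int.gcd a d := Int.gcd_pos_iff.mpr (Or.inr hd.ne')
  have hg2n : 0 < Int.gcd b e := Int.gcd_pos_iff.mpr (Or.inr he.ne')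
  set g1 : Int := (Int.gcd a d : Int) with hg1def
  set g2 : Int := (Int.gcd b e : Int) with hg2def
  have hg1 : 0 < g1 := by rw [hg1def]; exact_mod_cast hg1n
  have hg2 : 0 < g2 := by rw [hg2def]; exact_mod_cast hg2n
  have ha : a / g1 * g1 = a := Int.ediv_mul_cancel (Int.gcd_dvd_left a d)
  have hdd : d / g1 * g1 = d := Int.ediv_mul_cancel (Int.gcd_dvd_right a d)
  have hb : b / g2 * g2 = b := Int.ediv_mul_cancel (Int.gcd_dvd_left b e)
  have hee : e / g2 * g2 = e := Int.ediv_mul_cancel (Int.gcd_dvd_right b e)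
  set a' := a / g1; set d' := d / g1; set b' := b / g2; set e' := e / g2
  have hd' : 0 < d' := by nlinarith
  have he' : 0 < e' := by nlinarith
  have hcop1 : Int.gcd a' d' = 1 := Int.gcd_div_gcd_div_gcd hg1n
  have hcop2 : Int.gcd b' e' = 1 := Int.gcd_div_gcd_div_gcd hg2n
  have hcross : a' * e' = b' * d' := by
    have : (a' * e') * (g1 * g2) = (b' * d') * (g1 * g2) := by
      calc (a' * e') * (g1 * g2) = (a' * g1) * (e' * g2) := by ring
        _ = a * e := by rw [ha, hee]
        _ = b * d := h
        _ = (b' * g2) * (d' * g1) := by rw [hb, hdd]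
        _ = (b' * d') * (g1 * g2) := by ring
    exact mul_right_cancel₀ (by positivity) this
  have hde : d' ∣ e' := by
    refine Int.dvd_of_dvd_mul_left_of_gcd_one (b := e') (c := a') ?_ ?_
    · exact ⟨b', by linarith [hcross]⟩
    · rw [Int.gcd_comm]; exact hcop1
  have hed : e' ∣ d' := by
    refine Int.dvd_of_dvd_mul_left_of_gcd_one (b := d') (c := b') ?_ ?_
    · exact ⟨a', by linarith [hcross]⟩
    · rw [Int.gcd_comm]; exact hcop2
  have hde' : d' = e' := Int.dvd_antisymm hd'.le he'.le hde hed
  refine ⟨?_, hde'⟩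
  have : a' * e' = b' * e' := by rw [hcross, hde']
  exact mul_right_cancel₀ he'.ne' this

-- ===== VERDICT (by name: the statement is the Claim_ definition above) =====
theorem solution_spec : Claim_equal_solution := by
  intro n1 d1 n2 d2 _ hpre
  obtain ⟨hd1, hd2, hmax1⟩ := hpre
  -- the least common multiple found by A's first loop
  set L : Int := (Int.lcm d1 d2 : Int) with hLdef
  have hL1 : d1 ∣ L := Int.dvd_lcm_left d1 d2
  have hL2 : d2 ∣ L := Int.dvd_lcm_right d1 d2
  have hLpos : 0 < L := by
    have := Int.lcm_ne_zero hd1 hd2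
    rw [hLdef]; omega
  have habs1 : (d1.natAbs : Int) ≤ L := Int.le_of_dvd hLpos (Int.natAbs_dvd.mpr hL1)
  have habs2 : (d2.natAbs : Int) ≤ L := Int.le_of_dvd hLpos (Int.natAbs_dvd.mpr hL2)
  have hstart : 0 < max d1 d2 := by
    rcases hmax1 with h | h
    · exact lt_of_lt_of_le h (le_max_left d1 d2)
    · exact lt_of_lt_of_le h (le_max_right d1 d2)
  have hstartle : max d1 d2 ≤ L := by
    have e1 := Int.le_natAbs (a := d1)
    have e2 := Int.le_natAbs (a := d2)
    have := max_le (e1.trans habs1) (e2.trans habs2)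
    exact this
  have hmin : ∀ m : Int, 0 < m → m < L → ¬(d1 ∣ m ∧ d2 ∣ m) := by
    rintro m hm hmL ⟨hm1, hm2⟩
    have hmnat : m = (m.toNat : Int) := by omega
    rw [hmnat] at hm1 hm2
    have := Int.lcm_dvd hm1 hm2
    have hle : Int.lcm d1 d2 ≤ m.toNat := Nat.le_of_dvd (by omega) this
    have : L ≤ m := by rw [hLdef]; omega
    omega
  have hLbound : L ≤ ((d1.natAbs * d2.natAbs : Nat) : Int) := by
    have hdvd : Int.lcm d1 d2 ∣ d1.natAbs * d2.natAbs := by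
      rw [Int.lcm_def]; exact Nat.lcm_dvd_mul _ _
    have := Nat.le_of_dvd (by positivity) hdvd
    rw [hLdef]; exact_mod_cast this
  have hloop1 : lcmLoopA d1 d2 (d1.natAbs * d2.natAbs + 1) (max d1 d2) = L := by
    apply lcmLoopA_eq d1 d2 L hL1 hL2 hmin _ _ hstart hstartle
    omega
  -- exact division facts
  have hq1 : PySem.Int.floordiv L d1 * d1 = L := by
    have h0 : PySem.Int.mod L d1 = 0 := (PySem.Int.mod_eq_zero_iff_dvd _ _).mpr hL1
    have := PySem.Int.floordiv_mul_add_mod L d1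
    omega
  have hq2 : PySem.Int.floordiv L d2 * d2 = L := by
    have h0 : PySem.Int.mod L d2 = 0 := (PySem.Int.mod_eq_zero_iff_dvd _ _).mpr hL2
    have := PySem.Int.floordiv_mul_add_mod L d2
    omega
  set a : Int := n1 * PySem.Int.floordiv L d1 + n2 * PySem.Int.floordiv L d2 with hadef
  -- A's second loop
  set g : Int := (Int.gcd a L : Int) with hgdef
  have hgpos : 0 < g := by
    have : 0 < Int.gcd a L := Int.gcd_pos_iff.mpr (Or.inr hLpos.ne')
    rw [hgdef]; exact_mod_cast this
  have hgleL : g ≤ L := Int.le_of_dvd hLpos (Int.gcd_dvd_right a L)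
  have hloop2 : gcdLoopA a L ((max a L).toNat + 1) (max a L) = g := by
    apply gcdLoopA_eq a L hLpos.ne' _ _ (hgleL.trans (le_max_right a L))
    have := le_max_right a L
    omega
  -- evaluate the A port
  have hA : solution n1 d1 n2 d2 = [a / g, L / g] := by
    show [PySem.Int.floordiv _ _, PySem.Int.floordiv _ _] = _
    rw [hloop1, hloop2]
    simp only [PySem.Int.floordiv_eq_ediv_of_pos hgpos]
    rfl
  -- evaluate the B port
  set b0 : Int := n1 * d2 + n2 * d1 with hb0def
  set e0 : Int := d1 * d2 with he0def
  have he0 : e0 ≠ 0 := mul_ne_zero hd1 hd2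
  have hcross0 : a * e0 = b0 * L := by
    rw [hadef, hb0def, he0def]
    linear_combination (n1 * d2) * hq1 + (n2 * d1) * hq2
  have hB : ∀ b e : Int, 0 < e → a * e = b * L →
      solution_alt n1 d1 n2 d2 = [b / (Int.gcd b e : Int), e / (Int.gcd b e : Int)] →
      solution n1 d1 n2 d2 = solution_alt n1 d1 n2 d2 := by
    intro b e hepos hcr hBe
    rw [hA, hBe]
    obtain ⟨h1, h2⟩ := reduced_unique a L b e hLpos hepos hcr
    rw [h1, h2]
  by_cases hneg : e0 < 0
  · refine hB (-b0) (-e0) (by omega) (by linarith [hcross0]) ?_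
    show [PySem.Int.floordiv _ _, PySem.Int.floordiv _ _] = _
    rw [if_pos hneg]
    have hgB : ((gcdE (-b0).natAbs (-e0).natAbs : Nat) : Int) = (Int.gcd (-b0) (-e0) : Int) := by
      rw [gcdE_eq_gcd]; rfl
    rw [hgB]
    have hgBpos : 0 < (Int.gcd (-b0) (-e0) : Int) := by
      have : 0 < Int.gcd (-b0) (-e0) := Int.gcd_pos_iff.mpr (Or.inr (by omega))
      exact_mod_cast this
    simp only [PySem.Int.floordiv_eq_ediv_of_pos hgBpos]
    rfl
  · refine hB b0 e0 (by omega) hcross0 ?_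
    show [PySem.Int.floordiv _ _, PySem.Int.floordiv _ _] = _
    rw [if_neg hneg]
    have hgB : ((gcdE b0.natAbs e0.natAbs : Nat) : Int) = (Int.gcd b0 e0 : Int) := by
      rw [gcdE_eq_gcd]; rfl
    rw [hgB]
    have hgBpos : 0 < (Int.gcd b0 e0 : Int) := by
      have : 0 < Int.gcd b0 e0 := Int.gcd_pos_iff.mpr (Or.inr he0)
      exact_mod_cast this
    simp only [PySem.Int.floordiv_eq_ediv_of_pos hgBpos]
    rfl
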